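-- pv_equiv track=rewrite | github.com/shiva-aditya/codemind-python | odd_unique_elements_count.py | po
-- ===== SOURCE A (Python) =====
-- def po(a):
--     dic={}
--     for i in a:
--         if i not in dic:
--             dic[i]=1
--         else:
--             dic[i]+=1
--     c=0
--     for k in dic.keys():
--         if k%2!=0:
--             c+=1
--     return c
-- ===== SOURCE B (Python) =====
-- def po(a):
--     # Removal loop: repeatedly take the first remaining element, count it if odd,
--     # and delete all of its occurrences from the remainder. No dict or set.
--     c = 0
--     rest = list(a)
--     while rest:
--         x = rest[0]
--         if x % 2 != 0:
--             c += 1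
--         rest = [y for y in rest[1:] if y != x]
--     return c
-- ===== Notes on version B (the rewrite author's own statement) =====
-- stated objective: alternative
-- what changed: Replaces the frequency-dict build plus key-scan with a removal loop that maintains no dict or set: repeatedly take the first remaining element, count it if odd, and delete all its occurrences from the remainder.
import Mathlib
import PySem

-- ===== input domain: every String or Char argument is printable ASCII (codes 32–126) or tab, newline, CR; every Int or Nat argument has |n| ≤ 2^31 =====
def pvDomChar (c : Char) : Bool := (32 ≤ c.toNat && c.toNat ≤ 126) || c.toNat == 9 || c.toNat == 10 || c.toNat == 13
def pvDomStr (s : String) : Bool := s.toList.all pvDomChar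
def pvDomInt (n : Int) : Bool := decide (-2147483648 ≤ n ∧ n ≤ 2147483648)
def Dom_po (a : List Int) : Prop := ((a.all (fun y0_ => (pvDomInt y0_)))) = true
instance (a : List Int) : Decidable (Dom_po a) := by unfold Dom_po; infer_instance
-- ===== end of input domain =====

-- B replaces the dict-counting pass and key-scan with a recursive removal scheme
-- (take the first remaining element, count it if odd, strip all its duplicates, repeat): alternative algorithm.

-- ===== PORT A =====
def po (a : List Int) : Int :=
  let dic : PySem.Dict Int Int :=
    a.foldl (fun d i => if d.contains i = false then d.insert i 1 else d.modify i 0 (· + 1))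
      PySem.Dict.empty
  dic.keys.foldl (fun c k => if PySem.Int.mod k 2 ≠ 0 then c + 1 else c) 0

-- ===== PORT B =====
-- B's while loop over (rest, c): takes the head, bumps c if it is odd, strips its duplicates
def poAltLoop : List Int → Int → Int
  | [], c => c
  | x :: t, c =>
    poAltLoop (t.filter (fun y => y ≠ x)) (if PySem.Int.mod x 2 ≠ 0 then c + 1 else c)
termination_by l _ => l.length
decreasing_by
  simp only [List.length_unattach, List.length_cons, Nat.lt_succ_iff]
  exact le_trans (List.length_filter_le _ _) (by simp)

def po_alt (a : List Int) : Int := poAltLoop a 0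

-- ===== PRECONDITION & SPEC =====
def Spec_po (a : List Int) (out : Int) : Prop := out = po_alt a
instance (a : List Int) (out : Int) : Decidable (Spec_po a out) := by unfold Spec_po; infer_instance

-- ===== CLAIM (what is proved, stated in full; the proofs are below) =====
def Claim_equal_po : Prop := ∀ (a : List Int), Dom_po a → Spec_po a (po a)

-- ===== LEMMAS AND PROOFS =====

-- the oddness test both programs use
def pvOdd (x : Int) : Bool := decide (PySem.Int.mod x 2 ≠ 0)

-- one step of A's dict loop extends the key list exactly like Python's set.add
lemma po_step_keys (d : PySem.Dict Int Int) (x : Int) :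
    (if d.contains x = false then d.insert x 1 else d.modify x 0 (· + 1)).keys
      = PySem.Set.add d.keys x := by
  by_cases h : d.contains x = true
  · have hx : x ∈ d.keys := by rw [← PySem.Dict.contains_iff_mem_keys]; exact h
    simp [h, PySem.Dict.keys_modify, PySem.Dict.keys_insert_of_contains _ _ h,
      PySem.Set.add, PySem.Set.contains, hx]
  · have h' : d.contains x = false := by revert h; cases d.contains x <;> simp
    have hx : x ∉ d.keys := by rw [← PySem.Dict.contains_iff_mem_keys, h']; simp
    simp [h', PySem.Dict.keys_insert_of_not_contains, PySem.Set.add, PySem.Set.contains, hx]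

-- the keys of A's count-dict loop are the distinct elements in first-occurrence order
lemma po_keys_loop (a : List Int) (d : PySem.Dict Int Int) :
    (a.foldl (fun d i => if d.contains i = false then d.insert i 1 else d.modify i 0 (· + 1)) d).keys
      = PySem.Set.update d.keys a := by
  induction a generalizing d with
  | nil => rfl
  | cons x t ih =>
    rw [List.foldl_cons, ih, po_step_keys]
    rfl

-- A's second loop counts the keys with odd value: it is the length of the odd filter
lemma po_count_loop (l : List Int) (c : Int) :
    l.foldl (fun c k => if PySem.Int.mod k 2 ≠ 0 then c + 1 else c) c
      = c + ((l.filter pvOdd).length : Int) := by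
  induction l generalizing c with
  | nil => simp
  | cons x t ih =>
    rw [List.foldl_cons, List.filter_cons]
    by_cases h : PySem.Int.mod x 2 ≠ 0
    · rw [if_pos h, ih, if_pos (by simp only [pvOdd, decide_eq_true_eq]; exact h)]
      simp only [List.length_cons]
      push_cast; ring
    · rw [if_neg h, ih, if_neg (by simp only [pvOdd, decide_eq_true_eq]; exact h)]

-- A's value: the number of distinct odd elements, as a Finset cardinality
lemma po_eq_card (a : List Int) :
    po a = (((a.filter pvOdd).toFinset.card : Nat) : Int) := by
  simp only [po]
  rw [po_keys_loop, po_count_loop]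
  have hkeys : PySem.Set.update (PySem.Dict.empty : PySem.Dict Int Int).keys a
      = PySem.List.dedup a := by
    rw [PySem.List.dedup_eq_ofList]; rfl
  rw [hkeys]
  have hnd : ((PySem.List.dedup a).filter pvOdd).Nodup :=
    (PySem.List.nodup_dedup a).filter _
  rw [← List.toFinset_card_of_nodup hnd, zero_add]
  have hfs : ((PySem.List.dedup a).filter pvOdd).toFinset = (a.filter pvOdd).toFinset := by
    ext y
    simp
  rw [hfs]

-- removing the non-x elements commutes with the odd filter and erases x from the finset
lemma po_erase_step (t : List Int) (x : Int) :
    ((t.filter (fun y => y ≠ x)).filter pvOdd).toFinset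
      = (t.filter pvOdd).toFinset.erase x := by
  ext y
  simp [Finset.mem_erase]
  tauto

-- B's removal loop adds the number of distinct odd remaining elements to the counter
lemma po_alt_loop_card (a : List Int) (c : Int) :
    poAltLoop a c = c + (((a.filter pvOdd).toFinset.card : Nat) : Int) := by
  generalize hn : a.length = n
  induction n using Nat.strong_induction_on generalizing a c with
  | _ n ih =>
    match a, hn with
    | [], _ => simp [poAltLoop.eq_def]
    | x :: t, hn =>
      have hlt : (t.filter (fun y => y ≠ x)).length < n := by
        have := List.length_filter_le (fun y => decide (y ≠ x)) t
        simp only [List.length_cons] at hn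
        omega
      rw [poAltLoop.eq_def]
      simp only []
      rw [ih _ hlt _ _ rfl, po_erase_step, List.filter_cons]
      by_cases h : PySem.Int.mod x 2 ≠ 0
      · rw [if_pos h, if_pos (by simp only [pvOdd, decide_eq_true_eq]; exact h)]
        rw [show (x :: t.filter pvOdd).toFinset
              = insert x ((t.filter pvOdd).toFinset.erase x) from by
          ext y; simp [Finset.mem_erase]; tauto]
        rw [Finset.card_insert_of_notMem (Finset.notMem_erase _ _)]
        push_cast; ring
      · rw [if_neg h, if_neg (by simp only [pvOdd, decide_eq_true_eq]; exact h)]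
        have hx : x ∉ (t.filter pvOdd).toFinset := by
          simp only [List.mem_toFinset, List.mem_filter, pvOdd, decide_eq_true_eq]
          rintro ⟨-, hodd⟩
          exact h hodd
        rw [Finset.erase_eq_of_notMem hx]

-- ===== VERDICT (by name: the statement is the Claim_ definition above) =====
theorem po_spec : Claim_equal_po := by
  intro a _
  show po a = po_alt a
  rw [po_eq_card, po_alt]
  rw [po_alt_loop_card, zero_add]
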